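-- pv_equiv track=rewrite | github.com/Resethel/Kattis | Problems/pleasegofirst/Python3/pleasegofirst.py | get_total_wait
-- ===== SOURCE A (Python) =====
-- def get_total_wait(_queue):
--     # Return the combined waiting time of everybody
--
--     n = len(_queue)
--     last = 256*[-1]     # List of group's last person position in the queue (List of 256 ASCII)
--     for i in range(n):  # Fill the groups' last person in the queue position
--         last[ord(_queue[i])] = i
--
--     total_wait = 0
--     for i in range(n):
--         # for each person, we add its total waiting time
--         total_wait += 5 * (last[ord(_queue[i])] - i)
--
--     # Then we return the combined waiting time of everybody in the queue
--     return total_wait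
-- ===== SOURCE B (Python) =====
-- def get_total_wait(_queue):
--     # One pass builds per-group aggregates; waiting time per group is
--     # 5 * (count*last_position - sum_of_positions), summed over the 256 slots.
--     n = len(_queue)
--     last = 256 * [-1]
--     sumpos = 256 * [0]
--     count = 256 * [0]
--     for i in range(n):
--         c = ord(_queue[i])
--         last[c] = i
--         sumpos[c] += i
--         count[c] += 1
--     total_wait = 0
--     for c in range(256):
--         total_wait += 5 * (count[c] * last[c] - sumpos[c])
--     return total_wait
-- ===== Notes on version B (the rewrite author's own statement) =====
-- stated objective: alternative
-- what changed: Replaces A's per-person second pass over the queue with a single combined pass filling 256-slot last/sumpos/count arrays, then a fixed 256-slot aggregation using sum(last-i) = count*last - sumpos.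
import Mathlib
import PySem

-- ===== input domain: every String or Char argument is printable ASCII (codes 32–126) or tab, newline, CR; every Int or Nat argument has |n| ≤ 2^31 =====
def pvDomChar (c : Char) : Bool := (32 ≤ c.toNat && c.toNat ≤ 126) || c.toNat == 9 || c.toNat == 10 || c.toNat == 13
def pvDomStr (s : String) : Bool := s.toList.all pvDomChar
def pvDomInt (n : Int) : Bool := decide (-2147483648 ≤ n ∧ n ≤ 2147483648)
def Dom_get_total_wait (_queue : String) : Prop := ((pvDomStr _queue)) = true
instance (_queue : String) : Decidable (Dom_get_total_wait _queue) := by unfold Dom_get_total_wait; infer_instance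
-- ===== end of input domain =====

-- B keeps A's objective (sum of 5*(group's-last-position − own position)) but computes it by
-- per-group aggregation instead of a per-person second pass.  Within Dom every ord is < 256,
-- so Python's list indexing never raises; reads use getD (index always in range on Dom).

-- ===== PORT A =====
-- for i in range(n): last[ord(q[i])] = i
-- for i in range(n): total += 5 * (last[ord(q[i])] - i)
def get_total_wait (_queue : String) : Int :=
  let cs := _queue.toList
  let last : List Int :=
    (PySem.List.enumerate cs 0).foldl
      (fun l p => l.set p.2.toNat p.1) (List.replicate 256 (-1))
  (PySem.List.enumerate cs 0).foldl
    (fun t p => t + 5 * (last.getD p.2.toNat 0 - p.1)) 0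

-- ===== PORT B =====
-- one pass filling (last, sumpos, count); then a fold over the 256 group slots
def get_total_wait_alt (_queue : String) : Int :=
  let st :=
    (PySem.List.enumerate _queue.toList 0).foldl
      (fun (st : List Int × List Int × List Int) p =>
        let c := p.2.toNat
        (st.1.set c p.1,
         st.2.1.set c (st.2.1.getD c 0 + p.1),
         st.2.2.set c (st.2.2.getD c 0 + 1)))
      (List.replicate 256 (-1), List.replicate 256 0, List.replicate 256 0)
  (List.range 256).foldl
    (fun t c => t + 5 * (st.2.2.getD c 0 * st.1.getD c 0 - st.2.1.getD c 0)) 0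

-- ===== PRECONDITION & SPEC =====
def Spec_get_total_wait (_queue : String) (out : Int) : Prop := out = get_total_wait_alt _queue
instance (_queue : String) (out : Int) : Decidable (Spec_get_total_wait _queue out) := by unfold Spec_get_total_wait; infer_instance

-- ===== CLAIM (what is proved, stated in full; the proofs are below) =====
def Claim_equal_get_total_wait : Prop := ∀ (_queue : String), Dom_get_total_wait _queue → Spec_get_total_wait _queue (get_total_wait _queue)

-- ===== LEMMAS AND PROOFS =====

-- B's triple-state fold splits into three independent folds (the first is exactly A's last-array fold).
theorem trip_split (cs : List Char) (s : Int) (L S C : List Int) :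
    (PySem.List.enumerate cs s).foldl
      (fun (st : List Int × List Int × List Int) p =>
        let c := p.2.toNat
        (st.1.set c p.1,
         st.2.1.set c (st.2.1.getD c 0 + p.1),
         st.2.2.set c (st.2.2.getD c 0 + 1))) (L, S, C)
    = ((PySem.List.enumerate cs s).foldl (fun l p => l.set p.2.toNat p.1) L,
       (PySem.List.enumerate cs s).foldl (fun l p => l.set p.2.toNat (l.getD p.2.toNat 0 + p.1)) S,
       (PySem.List.enumerate cs s).foldl (fun l p => l.set p.2.toNat (l.getD p.2.toNat 0 + 1)) C) := by
  induction cs generalizing s L S C with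
  | nil => simp [PySem.List.enumerate_nil]
  | cons x xs ih =>
    rw [PySem.List.enumerate_cons]
    simp only [List.foldl_cons]
    exact ih (s+1) _ _ _

-- the per-group functional: Σ_{j<256} (C_j * L_j − S_j)
def Fsum (L S C : List Int) : Int :=
  ((List.range 256).map (fun j => C.getD j 0 * L.getD j 0 - S.getD j 0)).sum

theorem getD_eq (l : List Int) (j : Nat) (h : j < l.length) : l.getD j 0 = l[j] := by
  simp [List.getD, List.getElem?_eq_getElem h]

theorem getD_set_eq (l : List Int) (c j : Nat) (v : Int) (hj : j < l.length) :
    (l.set c v).getD j 0 = if j = c then v else l.getD j 0 := by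
  rw [getD_eq _ _ (by simpa using hj), getD_eq _ _ hj, List.getElem_set]
  rcases eq_or_ne j c with h | h
  · simp [h]
  · simp [h, Ne.symm h]

theorem range_sum (f : Nat → Int) : ((List.range 256).map f).sum = ∑ j ∈ Finset.range 256, f j := rfl

-- one queue step changes Fsum by L_c − i
theorem step_F (L S C : List Int) (c : Nat) (i : Int)
    (hS : S.length = 256) (hC : C.length = 256) (hc : c < 256) :
    Fsum L (S.set c (S.getD c 0 + i)) (C.set c (C.getD c 0 + 1))
      = Fsum L S C + (L.getD c 0 - i) := by
  unfold Fsum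
  rw [range_sum, range_sum]
  have h : ∀ j ∈ Finset.range 256,
      (C.set c (C.getD c 0 + 1)).getD j 0 * L.getD j 0 - (S.set c (S.getD c 0 + i)).getD j 0
      = (C.getD j 0 * L.getD j 0 - S.getD j 0) + (if j = c then L.getD c 0 - i else 0) := by
    intro j hj
    rw [Finset.mem_range] at hj
    rw [getD_set_eq _ _ _ _ (by omega), getD_set_eq _ _ _ _ (by omega)]
    rcases eq_or_ne j c with h | h
    · simp [h]; ring
    · simp [h]
  rw [Finset.sum_congr rfl h, Finset.sum_add_distrib, Finset.sum_ite_eq' (Finset.range 256) c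
    (fun _ => L.getD c 0 - i)]
  simp [hc]

-- main induction: folding the queue from (S,C) adds Σ (L_{ord} − i) to Fsum
theorem fold_F (cs : List Char) (s : Int) (L S C : List Int)
    (hS : S.length = 256) (hC : C.length = 256)
    (hord : ∀ x ∈ cs, x.toNat < 256) :
    Fsum L
      ((PySem.List.enumerate cs s).foldl (fun l p => l.set p.2.toNat (l.getD p.2.toNat 0 + p.1)) S)
      ((PySem.List.enumerate cs s).foldl (fun l p => l.set p.2.toNat (l.getD p.2.toNat 0 + 1)) C)
    = Fsum L S C
      + ((PySem.List.enumerate cs s).map (fun p => L.getD p.2.toNat 0 - p.1)).sum := by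
  induction cs generalizing s S C with
  | nil => simp [PySem.List.enumerate_nil]
  | cons x xs ih =>
    rw [PySem.List.enumerate_cons]
    simp only [List.foldl_cons, List.map_cons, List.sum_cons]
    rw [ih (s+1) _ _ (by simp [hS]) (by simp [hC]) (fun y hy => hord y (List.mem_cons_of_mem _ hy)),
        step_F L S C x.toNat s hS hC (hord x List.mem_cons_self)]
    ring

-- ===== VERDICT (by name: the statement is the Claim_ definition above) =====
theorem Fsum_zero (L : List Int) :
    Fsum L (List.replicate 256 0) (List.replicate 256 0) = 0 := by
  unfold Fsum
  rw [range_sum]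
  apply Finset.sum_eq_zero
  intro j hj
  rw [Finset.mem_range] at hj
  have h0 : (List.replicate 256 (0:Int)).getD j 0 = 0 := by
    rw [getD_eq _ _ (by rw [List.length_replicate]; exact hj), List.getElem_replicate]
  rw [h0]
  ring

-- ===== VERDICT (by name: the statement is the Claim_ definition above) =====
theorem get_total_wait_spec : Claim_equal_get_total_wait := by
  intro q hq
  have hord : ∀ x ∈ q.toList, x.toNat < 256 := by
    intro x hx
    have h := List.all_eq_true.mp (show q.toList.all pvDomChar = true from hq) x hx
    simp [pvDomChar] at h
    omega
  unfold Spec_get_total_wait get_total_wait get_total_wait_alt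
  rw [trip_split]
  simp only
  rw [PySem.List.foldl_add, PySem.List.foldl_add, List.sum_map_mul_left,
      List.sum_map_mul_left]
  rw [show ((List.range 256).map fun c =>
        ((PySem.List.enumerate q.toList 0).foldl
            (fun l p => l.set p.2.toNat (l.getD p.2.toNat 0 + 1)) (List.replicate 256 0)).getD c 0
          * ((PySem.List.enumerate q.toList 0).foldl (fun l p => l.set p.2.toNat p.1)
              (List.replicate 256 (-1))).getD c 0
          - ((PySem.List.enumerate q.toList 0).foldl
              (fun l p => l.set p.2.toNat (l.getD p.2.toNat 0 + p.1)) (List.replicate 256 0)).getD c 0).sum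
      = Fsum ((PySem.List.enumerate q.toList 0).foldl (fun l p => l.set p.2.toNat p.1)
          (List.replicate 256 (-1)))
          ((PySem.List.enumerate q.toList 0).foldl
            (fun l p => l.set p.2.toNat (l.getD p.2.toNat 0 + p.1)) (List.replicate 256 0))
          ((PySem.List.enumerate q.toList 0).foldl
            (fun l p => l.set p.2.toNat (l.getD p.2.toNat 0 + 1)) (List.replicate 256 0)) from rfl]
  rw [fold_F q.toList 0 _ _ _
        (by rw [List.length_replicate]) (by rw [List.length_replicate])
        hord, Fsum_zero]
  ring
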